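-- pv_equiv track=rewrite | github.com/UKGANG/Leetcode | data_structure/Kaitenzushi.py | getMaximumEatenDishCount
-- ===== SOURCE A (Python) =====
-- import collections
-- from typing import List
--
-- def getMaximumEatenDishCount(N: int, D: List[int], K: int) -> int:
--     q = collections.deque()
--     cache = set()
--     res = 0
--     for d in D:
--         if d not in cache:
--             q.append(d)
--             cache.add(d)
--             res += 1
--         if len(q) > K:
--             cache.remove(q.popleft())
--     return res
-- ===== SOURCE B (Python) =====
-- def getMaximumEatenDishCount(N, D, K):
--     last = {}
--     res = 0
--     for d in D:
--         if d not in last or last[d] <= res - K: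
--             res += 1
--             last[d] = res
--     return res
-- ===== Notes on version B (the rewrite author's own statement) =====
-- stated objective: simpler
-- what changed: Replaced the deque+set window with eviction by a dict mapping each dish to the eaten-index at which it was last eaten; a dish is eaten iff unseen or its last eaten-index fell out of the last K, so no queue and no eviction step remain.
import Mathlib
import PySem

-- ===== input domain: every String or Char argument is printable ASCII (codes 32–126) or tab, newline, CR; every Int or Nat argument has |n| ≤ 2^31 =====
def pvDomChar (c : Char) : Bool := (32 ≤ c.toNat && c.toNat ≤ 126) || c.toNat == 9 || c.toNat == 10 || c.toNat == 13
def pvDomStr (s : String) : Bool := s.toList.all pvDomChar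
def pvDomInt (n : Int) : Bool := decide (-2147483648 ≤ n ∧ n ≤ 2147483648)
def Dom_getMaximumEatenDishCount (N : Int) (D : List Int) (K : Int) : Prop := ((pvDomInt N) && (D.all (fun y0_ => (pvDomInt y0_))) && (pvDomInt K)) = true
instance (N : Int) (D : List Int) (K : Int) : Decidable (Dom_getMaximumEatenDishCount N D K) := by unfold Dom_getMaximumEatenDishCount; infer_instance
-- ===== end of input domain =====

-- B replaces A's deque+set sliding window (with its eviction step) by a dict from dish to
-- last eaten-index plus the running count: simpler, no queue and no eviction. (objective: simpler)

-- ===== PORT A =====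
-- loop body of A: 'if d not in cache: q.append(d); cache.add(d); res += 1' then
-- 'if len(q) > K: cache.remove(q.popleft())'.  popleft is ported as headI/tail; on every
-- reachable state q is nonempty when the pop fires (Python would raise IndexError on an
-- empty deque, which never happens).
def stepA (K : Int) (st : List Int × PySem.Set Int × Int) (d : Int) :
    List Int × PySem.Set Int × Int :=
  let st1 := if PySem.Set.contains st.2.1 d then st
             else (st.1 ++ [d], PySem.Set.add st.2.1 d, st.2.2 + 1)
  if (st1.1.length : Int) > K then
    (st1.1.tail, PySem.Set.discard st1.2.1 st1.1.headI, st1.2.2)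
  else st1

def getMaximumEatenDishCount (N : Int) (D : List Int) (K : Int) : Int :=
  (D.foldl (stepA K) ([], PySem.Set.empty, 0)).2.2

-- ===== PORT B =====
-- loop body of B: eat d (res += 1; last[d] = res) iff d unseen or last[d] <= res - K.
def stepB (K : Int) (st : PySem.Dict Int Int × Int) (d : Int) : PySem.Dict Int Int × Int :=
  match st.1.get? d with
  | none => (st.1.insert d (st.2 + 1), st.2 + 1)
  | some i => if i ≤ st.2 - K then (st.1.insert d (st.2 + 1), st.2 + 1) else st

def getMaximumEatenDishCount_alt (N : Int) (D : List Int) (K : Int) : Int :=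
  (D.foldl (stepB K) (PySem.Dict.empty, 0)).2

-- ===== PRECONDITION & SPEC =====
def Spec_getMaximumEatenDishCount (N : Int) (D : List Int) (K : Int) (out : Int) : Prop := out = getMaximumEatenDishCount_alt N D K
instance (N : Int) (D : List Int) (K : Int) (out : Int) : Decidable (Spec_getMaximumEatenDishCount N D K out) := by unfold Spec_getMaximumEatenDishCount; infer_instance

-- ===== CLAIM (what is proved, stated in full; the proofs are below) =====
def Claim_equal_getMaximumEatenDishCount : Prop := ∀ (N : Int) (D : List Int) (K : Int), Dom_getMaximumEatenDishCount N D K → Spec_getMaximumEatenDishCount N D K (getMaximumEatenDishCount N D K)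

-- ===== LEMMAS AND PROOFS =====

-- The simulation invariant between A's state (q, cache, r) and B's state (last, r):
-- r counts the eaten dishes so far; q holds the last min r (max K 0) eaten dishes in eat
-- order; cache is exactly q as a set; last maps each dish ever eaten to its most recent
-- eaten-index (1-based), so q's entries carry the consecutive indices ending at r.
def SimInv (K : Int) (q : List Int) (cache : PySem.Set Int) (last : PySem.Dict Int Int)
    (r : Int) : Prop :=
  0 ≤ r ∧
  (q.length : Int) = min r (max K 0) ∧
  q.Nodup ∧
  (∀ d : Int, d ∈ cache ↔ d ∈ q) ∧
  (∀ j : Nat, (h : j < q.length) → last.get? q[j] = some (r - q.length + j + 1)) ∧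
  (∀ d i, last.get? d = some i → 1 ≤ i ∧ i ≤ r) ∧
  (∀ d i, last.get? d = some i → r - (q.length : Int) < i → d ∈ q)

lemma step_inv {K : Int} {q : List Int} {cache : PySem.Set Int} {last : PySem.Dict Int Int}
    {r : Int} (hI : SimInv K q cache last r) (d : Int) :
    SimInv K (stepA K (q, cache, r) d).1 (stepA K (q, cache, r) d).2.1
      (stepB K (last, r) d).1 (stepA K (q, cache, r) d).2.2
    ∧ (stepA K (q, cache, r) d).2.2 = (stepB K (last, r) d).2 := by
  obtain ⟨hr, hlen, hnd, hc, hidx, hrange, hmem⟩ := hI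
  by_cases hd : d ∈ q
  · -- d in cache: both sides leave the state unchanged
    have hcont : PySem.Set.contains cache d = true :=
      (PySem.Set.contains_iff cache d).mpr ((hc d).mpr hd)
    have hpos : 0 < q.length := List.length_pos_of_mem hd
    have hnotgt : ¬ ((q.length : Int) > K) := by omega
    have eA : stepA K (q, cache, r) d = (q, cache, r) := by
      simp only [stepA]
      rw [if_pos hcont, if_neg hnotgt]
    obtain ⟨j, hj, hjd⟩ := List.getElem_of_mem hd
    have hlook : last.get? d = some (r - q.length + j + 1) := by
      rw [← hjd]; exact hidx j hj
    have hno : ¬ (r - (q.length : Int) + j + 1 ≤ r - K) := by omega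
    have eB : stepB K (last, r) d = (last, r) := by
      simp [stepB, hlook, hno]
    rw [eA, eB]
    exact ⟨⟨hr, hlen, hnd, hc, hidx, hrange, hmem⟩, rfl⟩
  · -- d not in cache: both sides eat
    have hcm : d ∉ cache := fun h => hd ((hc d).mp h)
    have hcont : PySem.Set.contains cache d = false := by
      cases h : PySem.Set.contains cache d
      · rfl
      · exact absurd ((PySem.Set.contains_iff cache d).mp h) hcm
    have eB : stepB K (last, r) d = (last.insert d (r + 1), r + 1) := by
      cases hg : last.get? d with
      | none => simp [stepB, hg]
      | some i =>
        have h1 := hrange d i hg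
        have h2 : i ≤ r - (q.length : Int) := by
          by_contra h
          exact hd (hmem d i hg (by omega))
        have h3 : i ≤ r - K := by omega
        simp [stepB, hg, h3]
    rw [eB]
    have hrange' : ∀ y i, (last.insert d (r + 1)).get? y = some i → 1 ≤ i ∧ i ≤ r + 1 := by
      intro y i hy
      rw [PySem.Dict.get?_insert] at hy
      split at hy
      · cases hy; omega
      · have := hrange y i hy; omega
    by_cases hT : ((q.length : Int) + 1 > K)
    · -- trim fires
      cases q with
      | nil =>
        have hK0 : K ≤ 0 := by simp at hT; omega
        have eA : stepA K (([] : List Int), cache, r) d =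
            ([], PySem.Set.discard (PySem.Set.add cache d) d, r + 1) := by
          simp only [stepA]
          rw [if_neg (show ¬ (PySem.Set.contains cache d = true) from fun h => hcm ((PySem.Set.contains_iff cache d).mp h))]
          rw [if_pos (by simp; omega)]
          rfl
        rw [eA]
        dsimp only
        refine ⟨⟨by omega, by simp; omega, List.nodup_nil, ?_, ?_, hrange', ?_⟩, rfl⟩
        · intro y
          simp [PySem.Set.mem_discard, PySem.Set.mem_add, hc y]
        · intro j h; simp at h
        · intro y i hy hgt
          have := hrange' y i hy
          simp at hgt
          omega
      | cons x rest =>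
        have hxq : x ∈ x :: rest := List.mem_cons_self
        have hK1 : 1 ≤ K := by
          have : 0 < (x :: rest).length := by simp
          by_contra h
          have : max K 0 = 0 := by omega
          rw [this] at hlen
          simp at hlen
          omega
        have hlenK : ((x :: rest).length : Int) = K := by omega
        have hKr : K = (rest.length : Int) + 1 := by
          simp only [List.length_cons] at hlenK; push_cast at hlenK; omega
        have eA : stepA K ((x :: rest), cache, r) d =
            (rest ++ [d], PySem.Set.discard (PySem.Set.add cache d) x, r + 1) := by
          simp only [stepA]
          rw [if_neg (show ¬ (PySem.Set.contains cache d = true) from fun h => hcm ((PySem.Set.contains_iff cache d).mp h))]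
          rw [if_pos (by simp; omega)]
          rfl
        rw [eA]
        dsimp only
        have hxrest : x ∉ rest := (List.nodup_cons.mp hnd).1
        have hdx : d ≠ x := fun h => hd (h ▸ hxq)
        have hdrest : d ∉ rest := fun h => hd (List.mem_cons_of_mem x h)
        have hlen' : (rest ++ [d]).length = (x :: rest).length := by simp
        refine ⟨⟨by omega, ?_, ?_, ?_, ?_, hrange', ?_⟩, rfl⟩
        · rw [hlen']; push_cast at hlenK ⊢; omega
        · simp [List.nodup_append, (List.nodup_cons.mp hnd).2]
          intro a ha h
          exact hdrest (h ▸ ha)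
        · intro y
          simp [PySem.Set.mem_discard, PySem.Set.mem_add, hc y]
          constructor
          · rintro ⟨h1 | h1, h2⟩
            · rcases h1 with h1 | h1
              · exact absurd h1 h2
              · exact Or.inl h1
            · exact Or.inr h1
          · rintro (h1 | h1)
            · exact ⟨Or.inl (Or.inr h1), fun h => hxrest (h ▸ h1)⟩
            · exact ⟨Or.inr h1, h1 ▸ hdx⟩
        · intro j hj
          rw [hlen'] at hj
          by_cases hjr : j < rest.length
          · have he : (rest ++ [d])[j]'(by simpa using Nat.lt_succ_of_lt hjr) = rest[j] :=
              List.getElem_append_left hjr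
            rw [he]
            have hne : rest[j] ≠ d := fun h => hdrest (h ▸ List.getElem_mem hjr)
            rw [PySem.Dict.get?_insert_of_ne last _ hne]
            have := hidx (j + 1) (by simpa using Nat.succ_lt_succ hjr)
            simp at this
            rw [this]
            congr 1
            simp only [List.length_append, List.length_cons, List.length_nil]
            push_cast
            omega
          · have hje : j = rest.length := by simp at hj; omega
            subst hje
            have he : (rest ++ [d])[rest.length]'(by simp) = d := by
              simp
            rw [he, PySem.Dict.get?_insert_self]
            congr 1
            simp only [List.length_append, List.length_cons, List.length_nil]
            push_cast
            omega
        · intro y i hy hgt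
          rw [hlen'] at hgt
          rw [PySem.Dict.get?_insert] at hy
          split at hy
          · rename_i hyd
            subst hyd; simp
          · have h1 := hrange y i hy
            have h2 : r - ((x :: rest).length : Int) < i := by omega
            have h3 := hmem y i hy h2
            rcases List.mem_cons.mp h3 with h4 | h4
            · -- y = x: its index is r - len + 1, contradicting hgt
              subst h4
              have h0 := hidx 0 (by simp)
              simp at h0
              rw [h0] at hy
              cases hy
              omega
            · simp [h4]
    · -- no trim: queue grows
      have eA : stepA K (q, cache, r) d = (q ++ [d], PySem.Set.add cache d, r + 1) := by
        simp only [stepA]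
        rw [if_neg (show ¬ (PySem.Set.contains cache d = true) from
              fun h => hcm ((PySem.Set.contains_iff cache d).mp h))]
        rw [if_neg (show ¬ (((q ++ [d]).length : Int) > K) by simp; omega)]
      rw [eA]
      dsimp only
      have hK1 : 1 ≤ K := by omega
      have hlenr : (q.length : Int) = r := by omega
      refine ⟨⟨by omega, by simp; omega, ?_, ?_, ?_, hrange', ?_⟩, rfl⟩
      · simp [List.nodup_append, hnd]
        intro a ha h
        exact hd (h ▸ ha)
      · intro y
        simp [PySem.Set.mem_add, hc y]
      · intro j hj
        simp at hj
        by_cases hjq : j < q.length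
        · have he : (q ++ [d])[j]'(by simpa using Nat.lt_succ_of_lt hjq) = q[j] :=
            List.getElem_append_left hjq
          rw [he]
          have hne : q[j] ≠ d := fun h => hd (h ▸ List.getElem_mem hjq)
          rw [PySem.Dict.get?_insert_of_ne last _ hne, hidx j hjq]
          congr 1
          simp only [List.length_append, List.length_cons, List.length_nil]
          push_cast
          omega
        · have hje : j = q.length := by omega
          subst hje
          have he : (q ++ [d])[q.length]'(by simp) = d := by simp
          rw [he, PySem.Dict.get?_insert_self]
          congr 1
          simp only [List.length_append, List.length_cons, List.length_nil]
          push_cast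
          omega
      · intro y i hy hgt
        rw [PySem.Dict.get?_insert] at hy
        split at hy
        · rename_i hyd; subst hyd; simp
        · have h2 : r - (q.length : Int) < i := by
            simp at hgt; omega
          exact List.mem_append_left _ (hmem y i hy h2)

lemma fold_inv (K : Int) (D : List Int) :
    ∀ (q : List Int) (cache : PySem.Set Int) (last : PySem.Dict Int Int) (r : Int),
    SimInv K q cache last r →
    (D.foldl (stepA K) (q, cache, r)).2.2 = (D.foldl (stepB K) (last, r)).2 := by
  induction D with
  | nil => intro q cache last r _; rfl
  | cons d D ih =>
    intro q cache last r hI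
    have h := step_inv hI d
    simp only [List.foldl_cons]
    have e1 : stepA K (q, cache, r) d =
        ((stepA K (q, cache, r) d).1, (stepA K (q, cache, r) d).2.1,
         (stepA K (q, cache, r) d).2.2) := rfl
    have e2 : stepB K (last, r) d =
        ((stepB K (last, r) d).1, (stepB K (last, r) d).2) := rfl
    rw [e1, e2, ← h.2]
    exact ih _ _ _ _ h.1

lemma inv_init (K : Int) : SimInv K [] PySem.Set.empty PySem.Dict.empty 0 := by
  refine ⟨le_refl 0, by simp, List.nodup_nil, by simp [PySem.Set.empty], ?_, ?_, ?_⟩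
  · intro j h; simp at h
  · intro d i h; simp [PySem.Dict.get?_empty] at h
  · intro d i h; simp [PySem.Dict.get?_empty] at h

-- ===== VERDICT (by name: the statement is the Claim_ definition above) =====
theorem getMaximumEatenDishCount_spec : Claim_equal_getMaximumEatenDishCount := by
  intro N D K _
  unfold Spec_getMaximumEatenDishCount getMaximumEatenDishCount getMaximumEatenDishCount_alt
  exact fold_inv K D [] PySem.Set.empty PySem.Dict.empty 0 (inv_init K)
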